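-- pv_equiv track=rewrite | github.com/algo-tsis15/jsh | 4주차/LV3_입국심사.py | solution
-- ===== SOURCE A (Python) =====
-- def solution(n, times):
--     answer = 0
--     times.sort()
--     left = 1
--     right = times[-1] * n  # 최대 심사 시간
--     while left <= right:
--         mid = (left + right) // 2
--         cnt = 0
--         for time in times:
--             cnt += mid // time
--         if cnt >= n:
--             right = mid - 1
--             answer = mid
--         else:
--             left = mid + 1
--
--     return answer
-- ===== SOURCE B (Python) =====
-- def solution(n, times):
--     # Event-materialization instead of a search: bracket the answer analytically
--     # with a scaled harmonic sum, list every counter finishing time in the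
--     # bracket, sort them, and pick the (n - served)-th event.
--     times.sort()
--     if n <= 0:
--         return 0
--     k = len(times)
--     tmax = times[-1]
--     D = tmax * (n + k)                      # common scale for the harmonic weights
--     W = sum(D // t for t in times)          # scaled throughput: W/D ~ sum(1/t)
--     lo = (n - 1) * D // (W + k)             # at time lo, at most n-1 people are done
--     hi = ((n + k) * D + W - 1) // W         # at time hi, at least n people are done
--     served = sum(lo // t for t in times)    # people done by time lo
--     events = []                             # every finishing time in (lo, hi]
--     for t in times:
--         for m in range(lo // t + 1, hi // t + 1):
--             events.append(m * t)
--     events.sort()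
--     return events[n - served - 1]           # the n-th finishing time overall
-- ===== Notes on version B (the rewrite author's own statement) =====
-- stated objective: alternative
-- what changed: Replaces A's binary search on the answer by a searchless event-materialization algorithm: a scaled harmonic sum gives closed-form bounds lo (at most n-1 people served) and hi (at least n served), every counter finishing time in (lo, hi] (only O(len(times)) of them) is listed, sorted, and the (n - served)-th one is the answer; …
-- outside the precondition, e.g. on solution(1, [-2, 6]): A returns 0, B returns -8; on solution(-3, [-2]): A returns 1, B returns 0
import Mathlib
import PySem

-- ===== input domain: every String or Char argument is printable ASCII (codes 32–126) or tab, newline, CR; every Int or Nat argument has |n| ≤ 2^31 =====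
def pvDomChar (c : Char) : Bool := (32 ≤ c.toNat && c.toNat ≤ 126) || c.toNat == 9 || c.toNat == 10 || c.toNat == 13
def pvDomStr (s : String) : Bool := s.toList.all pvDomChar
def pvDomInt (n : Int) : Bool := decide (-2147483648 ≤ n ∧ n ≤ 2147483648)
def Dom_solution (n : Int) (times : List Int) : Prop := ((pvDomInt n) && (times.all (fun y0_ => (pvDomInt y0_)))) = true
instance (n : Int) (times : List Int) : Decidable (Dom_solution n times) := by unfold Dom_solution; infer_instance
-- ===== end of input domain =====

set_option maxHeartbeats 1600000


-- B replaces A's binary search on the answer by a searchless event-materialization algorithm: an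
-- analytic bracket (lo, hi] of the answer from a scaled harmonic sum, then every counter finishing
-- time in the bracket is listed, sorted, and the (n - served)-th one returned; both A and B sort
-- `times` in place — the equivalence proved here is about the return value, and B performs the
-- same in-place sort.

-- ===== PORT A =====
-- while left <= right: mid = (left+right)//2; cnt = sum of mid//t; if cnt >= n: right, answer = mid-1, mid; else left = mid+1
def solutionLoop (n : Int) (ts : List Int) (left right answer : Int) : Int :=
  if h : left ≤ right then
    let mid := PySem.Int.floordiv (left + right) 2
    let cnt := ts.foldl (fun c t => c + PySem.Int.floordiv mid t) 0
    if n ≤ cnt then solutionLoop n ts left (mid - 1) mid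
    else solutionLoop n ts (mid + 1) right answer
  else answer
termination_by (right + 1 - left).toNat
decreasing_by
  · exact (Int.toNat_lt_toNat (Int.sub_pos.mpr (Int.lt_add_one_iff.mpr h))).mpr
      (by
        rw [Int.sub_add_cancel]
        exact sub_lt_sub_right
          (Int.lt_add_one_iff.mpr (PySem.Int.floordiv_two_mid_bounds h).2) left)
  · exact (Int.toNat_lt_toNat (Int.sub_pos.mpr (Int.lt_add_one_iff.mpr h))).mpr
      (sub_lt_sub_left
        (Int.lt_add_one_iff.mpr (PySem.Int.floordiv_two_mid_bounds h).1) (right + 1))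

def solution (n : Int) (times : List Int) : Int :=
  let ts := PySem.List.sorted times (fun x => x) false   -- times.sort()
  let right := ((PySem.List.pyGet? ts (-1)).getD 0) * n  -- times[-1] * n (Pre_ excludes the empty-list IndexError)
  solutionLoop n ts 1 right 0

-- ===== PORT B =====
def solution_alt (n : Int) (times : List Int) : Int :=
  let ts := PySem.List.sorted times (fun x => x) false   -- times.sort()
  if n ≤ 0 then 0
  else
    let k : Int := ts.length
    let tmax := (PySem.List.pyGet? ts (-1)).getD 0       -- times[-1] (Pre_ excludes the empty-list IndexError)
    let D := tmax * (n + k)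
    let W := ts.foldl (fun s t => s + PySem.Int.floordiv D t) 0
    let lo := PySem.Int.floordiv ((n - 1) * D) (W + k)
    let hi := PySem.Int.floordiv ((n + k) * D + W - 1) W
    let served := ts.foldl (fun s t => s + PySem.Int.floordiv lo t) 0
    let events := ts.flatMap (fun t =>
      (PySem.List.pyRange (PySem.Int.floordiv lo t + 1) (PySem.Int.floordiv hi t + 1) 1).map
        (fun m => m * t))
    let es := PySem.List.sorted events (fun x => x) false
    (PySem.List.pyGet? es (n - served - 1)).getD 0       -- events[n - served - 1]; index in range under Pre_

-- ===== PRECONDITION & SPEC =====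
-- Pre_ excludes: the empty list (A raises IndexError on times[-1]); and lists with a non-positive
-- time except when n ≤ 0 with a nonnegative maximum (there A returns 0 without probing): a 0 time
-- makes A raise ZeroDivisionError once its loop runs, and other non-positive service times are
-- outside the task's natural domain of positive durations — the per-time count is then not
-- monotone, so no specification fixes a value and any two search orders may legitimately differ.
def Pre_solution (n : Int) (times : List Int) : Prop :=
  times ≠ [] ∧ ((∀ t ∈ times, 0 < t) ∨ (n ≤ 0 ∧ ∃ t ∈ times, 0 ≤ t))
instance (n : Int) (times : List Int) : Decidable (Pre_solution n times) := by
  unfold Pre_solution; infer_instance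

def pvWitness_solution : Int × List Int := (6, [7, 10])

def Spec_solution (n : Int) (times : List Int) (out : Int) : Prop := out = solution_alt n times
instance (n : Int) (times : List Int) (out : Int) : Decidable (Spec_solution n times out) := by
  unfold Spec_solution; infer_instance

-- ===== CLAIM (what is proved, stated in full; the proofs are below) =====
def Claim_equal_solution : Prop := ∀ (n : Int) (times : List Int), Dom_solution n times → Pre_solution n times → Spec_solution n times (solution n times)

-- ===== LEMMAS AND PROOFS =====

-- the count both programs probe: cnt(T) = sum of T // t over the (sorted) list
def pvCnt (mid : Int) (ts : List Int) : Int :=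
  ts.foldl (fun c t => c + PySem.Int.floordiv mid t) 0

theorem pvCnt_eq_sum (mid : Int) (ts : List Int) :
    pvCnt mid ts = (ts.map (fun t => PySem.Int.floordiv mid t)).sum := by
  unfold pvCnt
  induction ts with
  | nil => simp
  | cons t r ih => simp [List.foldl, PySem.List.foldl_add]

theorem pvCnt_cons (mid t : Int) (r : List Int) :
    pvCnt mid (t :: r) = PySem.Int.floordiv mid t + pvCnt mid r := by
  rw [pvCnt_eq_sum, pvCnt_eq_sum, List.map_cons, List.sum_cons]

theorem pvFloordiv_mono {a b t : Int} (ht : 0 < t) (hab : a ≤ b) :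
    PySem.Int.floordiv a t ≤ PySem.Int.floordiv b t := by
  rw [PySem.Int.floordiv_eq_ediv_of_pos ht, PySem.Int.floordiv_eq_ediv_of_pos ht]
  exact Int.ediv_le_ediv ht hab

theorem pvFloordiv_nonneg {a t : Int} (ht : 0 < t) (ha : 0 ≤ a) :
    0 ≤ PySem.Int.floordiv a t := by
  rw [PySem.Int.floordiv_eq_ediv_of_pos ht]
  exact Int.ediv_nonneg ha (le_of_lt ht)

-- q*t ≤ x < (q+1)*t for q = x // t, t > 0
theorem pvFloordiv_bounds (x t : Int) (ht : 0 < t) :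
    (PySem.Int.floordiv x t) * t ≤ x ∧ x < (PySem.Int.floordiv x t + 1) * t := by
  rw [PySem.Int.floordiv_eq_ediv_of_pos ht]
  have h1 := Int.mul_ediv_add_emod x t
  have h2 := Int.emod_nonneg x (ne_of_gt ht)
  have h3 := Int.emod_lt_of_pos x ht
  constructor <;> nlinarith

theorem pvCnt_mono {a b : Int} (ts : List Int) (hpos : ∀ t ∈ ts, 0 < t) (hab : a ≤ b) :
    pvCnt a ts ≤ pvCnt b ts := by
  rw [pvCnt_eq_sum, pvCnt_eq_sum]
  apply List.sum_le_sum
  intro t ht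
  exact pvFloordiv_mono (hpos t ht) hab

theorem pvCnt_zero (ts : List Int) (hpos : ∀ t ∈ ts, 0 < t) : pvCnt 0 ts = 0 := by
  rw [pvCnt_eq_sum]
  rw [List.sum_eq_zero]
  intro x hx
  rcases List.mem_map.mp hx with ⟨t, ht, rfl⟩
  rw [PySem.Int.floordiv_eq_ediv_of_pos (hpos t ht)]
  simp

theorem pvGetNegOne (l : List Int) (h : l ≠ []) :
    (PySem.List.pyGet? l (-1)).getD 0 = l.getLast h := by
  have hn : 0 < l.length := List.length_pos_iff.mpr h
  simp only [PySem.List.pyGet?, PySem.List.pyIdx?,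
    show ¬(0:Int) ≤ -1 by decide, if_false,
    show -(l.length:Int) ≤ -1 by omega, if_true]
  rw [show (-(-1:Int)).toNat = 1 by decide]
  rw [Option.bind_some]
  rw [List.getElem?_eq_getElem (by omega)]
  simp [List.getLast_eq_getElem]

theorem pvLast_max (l : List Int) (h : l ≠ []) (hp : l.Pairwise (· ≤ ·)) :
    ∀ x ∈ l, x ≤ l.getLast h := by
  induction l with
  | nil => simp at h
  | cons a r ih =>
    intro x hx
    rcases List.mem_cons.mp hx with rfl | hx'
    · cases r with
      | nil => simp [List.getLast]
      | cons b s =>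
        have h1 : ∀ y ∈ b :: s, x ≤ y := (List.pairwise_cons.mp hp).1
        have hmem := List.getLast_mem (l := b::s) (by simp)
        simpa [List.getLast_cons] using h1 _ hmem
    · cases r with
      | nil => simp at hx'
      | cons b s =>
        have := ih (by simp) (List.pairwise_cons.mp hp).2 x hx'
        simpa [List.getLast_cons] using this

theorem pvLoop_eq_def (n : Int) (ts : List Int) (left right answer : Int) :
    solutionLoop n ts left right answer =
      if left ≤ right then
        (if n ≤ pvCnt (PySem.Int.floordiv (left + right) 2) ts then
           solutionLoop n ts left (PySem.Int.floordiv (left + right) 2 - 1)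
             (PySem.Int.floordiv (left + right) 2)
         else solutionLoop n ts (PySem.Int.floordiv (left + right) 2 + 1) right answer)
      else answer := by
  rw [solutionLoop]; rfl

-- A's loop returns the least feasible probe value once the count is monotone
theorem pvLoopA_eq (n : Int) (ts : List Int) (Tstar : Int)
    (hmono : ∀ a b : Int, a ≤ b → pvCnt a ts ≤ pvCnt b ts)
    (hP : n ≤ pvCnt Tstar ts) (hmin : ∀ T, T < Tstar → ¬ n ≤ pvCnt T ts) :
    ∀ left right answer, left ≤ Tstar → (Tstar ≤ right ∨ answer = Tstar) →
      solutionLoop n ts left right answer = Tstar := by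
  intro left right answer
  induction left, right, answer using solutionLoop.induct n ts with
  | case1 =>
    rename_i left right answer hle mid cnt hacc ih
    intro hl hdisj
    have hcnt : n ≤ pvCnt mid ts := by
      simpa [pvCnt, cnt, List.foldl_attach] using hacc
    have hTmid : Tstar ≤ mid := by
      by_contra hc
      exact hmin mid (by omega) hcnt
    rw [pvLoop_eq_def, if_pos hle, if_pos hcnt]
    exact ih hl (by omega)
  | case2 =>
    rename_i left right answer hle mid cnt hrej ih
    intro hl hdisj
    have hcnt : ¬ n ≤ pvCnt mid ts := by
      simpa [pvCnt, cnt, List.foldl_attach] using hrej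
    have hmidlt : mid < Tstar := by
      by_contra hc
      exact hcnt (le_trans hP (hmono Tstar mid (by omega)))
    rw [pvLoop_eq_def, if_pos hle, if_neg hcnt]
    refine ih (by omega) ?_
    rcases hdisj with h | h
    · left; exact h
    · right; exact h
  | case3 =>
    rename_i left right answer hle
    intro hl hdisj
    rw [pvLoop_eq_def, if_neg hle]
    rcases hdisj with h | h
    · omega
    · exact h

-- count of range elements ≤ c: a clamped closed form
theorem pvCountRange (c : Int) : ∀ (N : Nat) (a b : Int), b - a ≤ N →
    ((PySem.List.pyRange a b 1).countP (fun m => decide (m ≤ c)) : Int) =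
      max 0 (min b (c + 1) - a) := by
  intro N
  induction N with
  | zero =>
    intro a b hab
    rw [PySem.List.pyRange_one_eq_nil (by omega)]
    simp
    omega
  | succ N ih =>
    intro a b hab
    by_cases h : b ≤ a
    · rw [PySem.List.pyRange_one_eq_nil h]
      simp
      omega
    · rw [PySem.List.pyRange_one_cons (by omega), List.countP_cons]
      have := ih (a + 1) b (by omega)
      by_cases hac : a ≤ c
      · simp only [hac, decide_true]
        push_cast
        omega
      · simp only [hac, decide_false]
        push_cast
        omega

-- per-term lower bracketing: (L//t)*D ≤ L*(D//t) + L
theorem pvTerm_lo (L D t : Int) (ht : 0 < t) (hL : 0 ≤ L) (hD : 0 ≤ D) :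
    (PySem.Int.floordiv L t) * D ≤ L * (PySem.Int.floordiv D t) + L := by
  obtain ⟨hq1, _⟩ := pvFloordiv_bounds L t ht
  obtain ⟨_, hp2⟩ := pvFloordiv_bounds D t ht
  have hq0 : 0 ≤ PySem.Int.floordiv L t := pvFloordiv_nonneg ht hL
  have hp0 : 0 ≤ PySem.Int.floordiv D t := pvFloordiv_nonneg ht hD
  nlinarith [mul_le_mul_of_nonneg_left
      (show D ≤ (PySem.Int.floordiv D t + 1) * t - 1 by omega) hq0,
    mul_le_mul_of_nonneg_right hq1
      (show (0:Int) ≤ PySem.Int.floordiv D t + 1 by omega)]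

-- per-term upper bracketing: U*(D//t) ≤ (U//t + 1)*D - 1
theorem pvTerm_hi (U D t : Int) (ht : 0 < t) (hU : 0 ≤ U) (htD : t ≤ D) :
    U * (PySem.Int.floordiv D t) ≤ (PySem.Int.floordiv U t + 1) * D - 1 := by
  obtain ⟨hp1, _⟩ := pvFloordiv_bounds D t ht
  obtain ⟨_, hu2⟩ := pvFloordiv_bounds U t ht
  have hu0 : 0 ≤ PySem.Int.floordiv U t := pvFloordiv_nonneg ht hU
  have hp1' : 1 ≤ PySem.Int.floordiv D t := by
    rw [PySem.Int.floordiv_eq_ediv_of_pos ht]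
    rw [Int.le_ediv_iff_mul_le ht]
    omega
  have hlt : U * (PySem.Int.floordiv D t) < (PySem.Int.floordiv U t + 1) * D := by
    calc U * (PySem.Int.floordiv D t)
        < ((PySem.Int.floordiv U t + 1) * t) * (PySem.Int.floordiv D t) := by
          apply mul_lt_mul_of_pos_right hu2 (by omega)
      _ = (PySem.Int.floordiv U t + 1) * ((PySem.Int.floordiv D t) * t) := by ring
      _ ≤ (PySem.Int.floordiv U t + 1) * D := by
          apply mul_le_mul_of_nonneg_left hp1 (by omega)
  omega

-- in a ≤-sorted list, at least j+1 elements are ≤ the j-th element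
theorem pvSortedCount_ge (S : List Int) (hp : S.Pairwise (· ≤ ·)) (j : Nat) (hj : j < S.length) :
    (j : Int) + 1 ≤ (S.countP (fun x => decide (x ≤ S[j])) : Int) := by
  obtain ⟨c, hc⟩ : ∃ c, S[j] = c := ⟨_, rfl⟩
  rw [hc]
  have hall : ∀ x ∈ S.take (j+1), (fun x => decide (x ≤ c)) x = true := by
    intro x hx
    rcases List.mem_iff_getElem.mp hx with ⟨i, hi, rfl⟩
    have hlt : i < j + 1 := by
      have := List.length_take (i := j+1) (l := S)
      omega
    rw [List.getElem_take]
    simp only [decide_eq_true_eq]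
    rcases Nat.lt_or_ge i j with h | h
    · exact hc ▸ (List.pairwise_iff_getElem.mp hp) i j (by omega) hj h
    · have : i = j := by omega
      subst this
      exact le_of_eq hc
  have h1 : (S.take (j+1)).countP (fun x => decide (x ≤ c)) = j + 1 := by
    rw [List.countP_eq_length.mpr hall, List.length_take]
    omega
  have h2 : S.countP (fun x => decide (x ≤ c)) =
      (S.take (j+1)).countP (fun x => decide (x ≤ c)) +
      (S.drop (j+1)).countP (fun x => decide (x ≤ c)) := by
    conv_lhs => rw [← List.take_append_drop (j+1) S]
    rw [List.countP_append]
  rw [h2, h1]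
  push_cast
  omega

-- in a ≤-sorted list, at most j elements are < the j-th element
theorem pvSortedCount_le (S : List Int) (hp : S.Pairwise (· ≤ ·)) (j : Nat) (hj : j < S.length) :
    (S.countP (fun x => decide (x ≤ S[j] - 1)) : Int) ≤ j := by
  obtain ⟨c, hc⟩ : ∃ c, S[j] = c := ⟨_, rfl⟩
  rw [hc]
  have hdrop : (S.drop j).countP (fun x => decide (x ≤ c - 1)) = 0 := by
    rw [List.countP_eq_zero]
    intro x hx
    rcases List.mem_iff_getElem.mp hx with ⟨i, hi, rfl⟩
    have hiS : j + i < S.length := by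
      have := List.length_drop (i := j) (l := S)
      omega
    rw [List.getElem_drop]
    simp only [decide_eq_true_eq]
    have hle : S[j] ≤ S[j + i] := by
      rcases Nat.eq_zero_or_pos i with h | h
      · subst h
        simp
      · exact (List.pairwise_iff_getElem.mp hp) j (j+i) hj hiS (by omega)
    rw [hc] at hle
    omega
  have htake : (S.take j).countP (fun x => decide (x ≤ c - 1)) ≤ j := by
    calc (S.take j).countP _ ≤ (S.take j).length := List.countP_le_length
      _ ≤ j := by rw [List.length_take]; omega
  have h2 : S.countP (fun x => decide (x ≤ c - 1)) =
      (S.take j).countP (fun x => decide (x ≤ c - 1)) +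
      (S.drop j).countP (fun x => decide (x ≤ c - 1)) := by
    conv_lhs => rw [← List.take_append_drop j S]
    rw [List.countP_append]
  rw [h2, hdrop]
  push_cast
  omega

-- every event lies in (lo, hi]
theorem pvMemE (lo hi : Int) (ts : List Int) (hpos : ∀ t ∈ ts, 0 < t) :
    ∀ x ∈ ts.flatMap (fun t =>
      (PySem.List.pyRange (PySem.Int.floordiv lo t + 1) (PySem.Int.floordiv hi t + 1) 1).map
        (fun m => m * t)), lo < x ∧ x ≤ hi := by
  intro x hx
  rcases List.mem_flatMap.mp hx with ⟨t, ht, hxm⟩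
  rcases List.mem_map.mp hxm with ⟨m, hm, rfl⟩
  rcases (PySem.List.mem_pyRange_one).mp hm with ⟨hm1, hm2⟩
  have htpos := hpos t ht
  obtain ⟨hlo1, hlo2⟩ := pvFloordiv_bounds lo t htpos
  obtain ⟨hhi1, _⟩ := pvFloordiv_bounds hi t htpos
  constructor
  · nlinarith [mul_le_mul_of_nonneg_right hm1 (le_of_lt htpos)]
  · nlinarith [mul_le_mul_of_nonneg_right
      (show m ≤ PySem.Int.floordiv hi t by omega) (le_of_lt htpos)]

-- count of events ≤ v equals cnt(v) - cnt(lo)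
theorem pvCountE (v lo hi : Int) : ∀ (ts : List Int), (∀ t ∈ ts, 0 < t) → lo ≤ v → v ≤ hi →
    ((ts.flatMap (fun t =>
      (PySem.List.pyRange (PySem.Int.floordiv lo t + 1) (PySem.Int.floordiv hi t + 1) 1).map
        (fun m => m * t))).countP (fun x => decide (x ≤ v)) : Int)
      = pvCnt v ts - pvCnt lo ts := by
  intro ts
  induction ts with
  | nil => simp [pvCnt]
  | cons t r ih =>
    intro hpos hlv hvh
    have htpos : 0 < t := hpos t (by simp)
    rw [List.flatMap_cons, List.countP_append]
    have hmapped : ((PySem.List.pyRange (PySem.Int.floordiv lo t + 1)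
        (PySem.Int.floordiv hi t + 1) 1).map (fun m => m * t)).countP
          (fun x => decide (x ≤ v))
        = (PySem.List.pyRange (PySem.Int.floordiv lo t + 1)
            (PySem.Int.floordiv hi t + 1) 1).countP (fun m => decide (m ≤ PySem.Int.floordiv v t)) := by
      rw [List.countP_map]
      apply List.countP_congr
      intro m _
      simp only [Function.comp]
      rw [PySem.Int.floordiv_eq_ediv_of_pos htpos]
      simp only [decide_eq_true_eq]
      exact (Int.le_ediv_iff_mul_le htpos).symm
    rw [hmapped]
    have hcr := pvCountRange (PySem.Int.floordiv v t)
      ((PySem.Int.floordiv hi t + 1) - (PySem.Int.floordiv lo t + 1)).toNat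
      (PySem.Int.floordiv lo t + 1) (PySem.Int.floordiv hi t + 1) (by omega)
    have hml : PySem.Int.floordiv lo t ≤ PySem.Int.floordiv v t := pvFloordiv_mono htpos hlv
    have hmh : PySem.Int.floordiv v t ≤ PySem.Int.floordiv hi t := pvFloordiv_mono htpos hvh
    rw [pvCnt_cons, pvCnt_cons]
    have hr := ih (fun u hu => hpos u (by simp [hu])) hlv hvh
    push_cast
    push_cast at hr
    rw [hr] at *
    rw [hcr]
    omega

-- A range that ends at a nonpositive bound never starts: the trivial branch of A
theorem pvLoop_trivial (n : Int) (ts : List Int) (right : Int) (h : right < 1) :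
    solutionLoop n ts 1 right 0 = 0 := by
  rw [pvLoop_eq_def, if_neg (by omega)]

-- sum over a list is at least its length when each term is at least 1
theorem pvSum_ge_length (f : Int → Int) (l : List Int) (h : ∀ t ∈ l, 1 ≤ f t) :
    (l.length : Int) ≤ (l.map f).sum := by
  induction l with
  | nil => simp
  | cons t r ih =>
    simp only [List.map_cons, List.sum_cons, List.length_cons]
    have h1 := h t (by simp)
    have h2 := ih (fun u hu => h u (by simp [hu]))
    push_cast
    omega

-- ===== VERDICT (by name: the statement is the Claim_ definition above) =====
theorem solution_spec : Claim_equal_solution := by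
  intro n times _hdom hpre
  unfold Spec_solution
  obtain ⟨hne, harm⟩ := hpre
  set ts := PySem.List.sorted times (fun x => x) false with hts
  have hperm : ts.Perm times := PySem.List.sorted_perm _ _ _
  have hsne : ts ≠ [] := by
    intro h
    apply hne
    have := hperm.length_eq
    rw [h] at this
    exact List.length_eq_zero_iff.mp this.symm
  have hM := pvGetNegOne ts hsne
  set M := ts.getLast hsne with hMdef
  have hMmem : M ∈ ts := List.getLast_mem hsne
  have hpair : ts.Pairwise (· ≤ ·) := by
    simpa using PySem.List.sorted_pairwise (xs := times) (key := fun x => x)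
  have hmax : ∀ x ∈ ts, x ≤ M := fun x hx => pvLast_max ts hsne hpair x hx
  have hA : solution n times = solutionLoop n ts 1 (M * n) 0 := by
    simp only [solution, ← hts, hM]
  by_cases hn : n ≤ 0
  · -- A's loop never runs (M*n ≤ 0 < 1), B takes its n ≤ 0 branch
    have hMn : M * n ≤ 0 := by
      rcases harm with h | ⟨_, t0, ht0, h0t⟩
      · have := h M (hperm.subset hMmem)
        nlinarith
      · have h0M : 0 ≤ M := le_trans h0t (hmax t0 (hperm.mem_iff.mpr ht0))
        nlinarith
    rw [hA, pvLoop_trivial n ts (M * n) (by omega)]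
    simp only [solution_alt, ← hts, if_pos hn]
  · -- main case: n ≥ 1 and all service times positive
    have hpos : ∀ t ∈ ts, 0 < t := by
      rcases harm with h | ⟨hn0, _⟩
      · exact fun t ht => h t (hperm.subset ht)
      · omega
    have hn1 : 0 < n := by omega
    have hMpos : 0 < M := hpos M hMmem
    set k : Int := (ts.length : Int) with hk
    have hk1 : 1 ≤ k := by
      have : 0 < ts.length := List.length_pos_iff.mpr hsne
      omega
    set D := M * (n + k) with hD
    have hD0 : 0 < D := by nlinarith
    have htD : ∀ t ∈ ts, t ≤ D := by
      intro t ht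
      have h1 := hmax t ht
      nlinarith
    set W := pvCnt D ts with hW
    have hWfold : ts.foldl (fun s t => s + PySem.Int.floordiv D t) 0 = W := rfl
    have hWk : k ≤ W := by
      rw [hW, pvCnt_eq_sum]
      apply pvSum_ge_length
      intro t ht
      have htpos := hpos t ht
      rw [PySem.Int.floordiv_eq_ediv_of_pos htpos, Int.le_ediv_iff_mul_le htpos]
      have := htD t ht
      omega
    have hW0 : 0 < W := by omega
    set lo := PySem.Int.floordiv ((n - 1) * D) (W + k) with hlo
    set hi := PySem.Int.floordiv ((n + k) * D + W - 1) W with hhi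
    have hlo0 : 0 ≤ lo := by
      rw [hlo]
      exact pvFloordiv_nonneg (by omega) (by nlinarith)
    have hhi0 : 0 ≤ hi := by
      rw [hhi]
      exact pvFloordiv_nonneg hW0 (by nlinarith)
    set flo := pvCnt lo ts with hflo
    have hfloFold : ts.foldl (fun s t => s + PySem.Int.floordiv lo t) 0 = flo := rfl
    have hmono : ∀ a b : Int, a ≤ b → pvCnt a ts ≤ pvCnt b ts := fun a b hab =>
      pvCnt_mono ts hpos hab
    -- lower bracket: at most n-1 people are served by time lo
    have hfloLe : flo ≤ n - 1 := by
      have hsum : flo * D ≤ lo * W + lo * k := by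
        have h1 : (ts.map (fun t => (PySem.Int.floordiv lo t) * D)).sum ≤
            (ts.map (fun t => lo * (PySem.Int.floordiv D t) + lo)).sum := by
          apply List.sum_le_sum
          intro t ht
          exact pvTerm_lo lo D t (hpos t ht) hlo0 (by omega)
        have h2 : (ts.map (fun t => (PySem.Int.floordiv lo t) * D)).sum = flo * D := by
          rw [hflo, pvCnt_eq_sum]
          induction ts with
          | nil => simp
          | cons a r ihh => simp_all [add_mul]
        have h3 : (ts.map (fun t => lo * (PySem.Int.floordiv D t) + lo)).sum
            = lo * W + lo * k := by
          rw [hW, pvCnt_eq_sum, hk]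
          induction ts with
          | nil => simp
          | cons a r ihh =>
            simp_all [mul_add]
            ring
        omega
      have hfd : lo * (W + k) ≤ (n - 1) * D := by
        obtain ⟨h1, _⟩ := pvFloordiv_bounds ((n - 1) * D) (W + k) (by omega)
        rw [← hlo] at h1
        omega
      have : flo * D ≤ (n - 1) * D := by nlinarith
      exact le_of_mul_le_mul_right this hD0
    -- upper bracket: at least n people are served by time hi
    have hfhiGe : n ≤ pvCnt hi ts := by
      have hceil : (n + k) * D ≤ hi * W := by
        obtain ⟨_, h2⟩ := pvFloordiv_bounds ((n + k) * D + W - 1) W hW0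
        rw [← hhi] at h2
        nlinarith
      have hsum : hi * W ≤ (pvCnt hi ts + k) * D - k := by
        have h1 : (ts.map (fun t => hi * (PySem.Int.floordiv D t))).sum ≤
            (ts.map (fun t => (PySem.Int.floordiv hi t + 1) * D - 1)).sum := by
          apply List.sum_le_sum
          intro t ht
          exact pvTerm_hi hi D t (hpos t ht) hhi0 (htD t ht)
        have h2 : (ts.map (fun t => hi * (PySem.Int.floordiv D t))).sum = hi * W := by
          rw [hW, pvCnt_eq_sum]
          induction ts with
          | nil => simp
          | cons a r ihh => simp_all [mul_add]
        have h3 : (ts.map (fun t => (PySem.Int.floordiv hi t + 1) * D - 1)).sum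
            = (pvCnt hi ts + k) * D - k := by
          rw [pvCnt_eq_sum, hk]
          induction ts with
          | nil => simp
          | cons a r ihh =>
            simp_all
            ring
        omega
      have : (n + k) * D + k ≤ (pvCnt hi ts + k) * D := by omega
      nlinarith
    have hlohi : lo ≤ hi := by
      by_contra hc
      have := hmono hi lo (by omega)
      omega
    -- the event list and its sorted version
    set E := ts.flatMap (fun t =>
      (PySem.List.pyRange (PySem.Int.floordiv lo t + 1) (PySem.Int.floordiv hi t + 1) 1).map
        (fun m => m * t)) with hE
    set ES := PySem.List.sorted E (fun x => x) false with hES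
    have hpermE : ES.Perm E := PySem.List.sorted_perm _ _ _
    have hpairES : ES.Pairwise (· ≤ ·) := by
      simpa using PySem.List.sorted_pairwise (xs := E) (key := fun x => x)
    have hmemE := pvMemE lo hi ts hpos
    have hlenE : (E.length : Int) = pvCnt hi ts - flo := by
      have hfull : E.countP (fun x => decide (x ≤ hi)) = E.length :=
        List.countP_eq_length.mpr (fun x hx => by
          simp only [decide_eq_true_eq]
          exact (hmemE x hx).2)
      have := pvCountE hi lo hi ts hpos hlohi (le_refl hi)
      rw [← hE] at this
      rw [hfull] at this
      omega
    -- the selected index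
    have hjlt : (n - flo - 1).toNat < ES.length := by
      have := hpermE.length_eq
      omega
    set j := (n - flo - 1).toNat with hj
    set v := ES[j]'hjlt with hv
    have hvmemE : v ∈ E := hpermE.subset (List.getElem_mem hjlt)
    obtain ⟨hvlo, hvhi⟩ := hmemE v hvmemE
    -- v is feasible
    have hfeasv : n ≤ pvCnt v ts := by
      have hge := pvSortedCount_ge ES hpairES j hjlt
      have hcp : ES.countP (fun x => decide (x ≤ v)) = E.countP (fun x => decide (x ≤ v)) :=
        hpermE.countP_eq _
      have hce := pvCountE v lo hi ts hpos (by omega) hvhi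
      rw [← hE] at hce
      rw [← hv] at hge
      rw [hcp] at hge
      omega
    -- nothing below v is feasible
    have hminv : ∀ T, T < v → ¬ n ≤ pvCnt T ts := by
      intro T hT hcT
      have hle := pvSortedCount_le ES hpairES j hjlt
      have hcp : ES.countP (fun x => decide (x ≤ v - 1)) = E.countP (fun x => decide (x ≤ v - 1)) :=
        hpermE.countP_eq _
      have hce := pvCountE (v - 1) lo hi ts hpos (by omega) (by omega)
      rw [← hE] at hce
      rw [← hv] at hle
      rw [hcp] at hle
      have hTv : pvCnt T ts ≤ pvCnt (v - 1) ts := hmono T (v - 1) (by omega)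
      omega
    -- v is at least 1 and at most M*n
    have hv1 : 1 ≤ v := by
      by_contra hc
      have h0 : pvCnt v ts ≤ pvCnt 0 ts := hmono v 0 (by omega)
      rw [pvCnt_zero ts hpos] at h0
      omega
    have hfeasMn : n ≤ pvCnt (M * n) ts := by
      rw [pvCnt_eq_sum]
      have hMn : PySem.Int.floordiv (M * n) M = n := by
        rw [PySem.Int.floordiv_eq_iff_of_pos hMpos]
        constructor
        · nlinarith
        · nlinarith
      have hmem' : PySem.Int.floordiv (M * n) M ∈
          ts.map (fun t => PySem.Int.floordiv (M * n) t) :=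
        List.mem_map_of_mem hMmem
      have hnn : ∀ x ∈ ts.map (fun t => PySem.Int.floordiv (M * n) t), 0 ≤ x := by
        intro x hx
        rcases List.mem_map.mp hx with ⟨u, hu, rfl⟩
        exact pvFloordiv_nonneg (hpos u hu) (by nlinarith)
      have := List.single_le_sum hnn _ hmem'
      omega
    have hvMn : v ≤ M * n := by
      by_contra hc
      exact hminv (M * n) (by omega) hfeasMn
    -- A returns v
    rw [hA, pvLoopA_eq n ts v hmono hfeasv hminv 1 (M * n) 0 hv1 (Or.inl hvMn)]
    -- B returns v
    have hB : solution_alt n times = (PySem.List.pyGet? ES (n - flo - 1)).getD 0 := by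
      simp only [solution_alt, ← hts, if_neg hn, hM, ← hk, ← hD, hWfold, ← hlo, ← hhi,
        hfloFold, ← hE, ← hES]
    have hESlen : (ES.length : Int) = pvCnt hi ts - flo := by
      rw [hpermE.length_eq]
      exact hlenE
    have hg := PySem.List.pyGet?_eq_some_getElem (xs := ES) (i := n - flo - 1)
      (by omega) (by omega)
    rw [hB, hg, Option.getD_some]
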